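-- pv_equiv track=rewrite | github.com/mal1on/checkio-solutions | Rock/Halloween Monsters.py | halloween_monsters
-- ===== SOURCE A (Python) =====
-- from collections import Counter as ct
--
-- def halloween_monsters(spell: str) -> int:
--
--     monsters = ['skeleton', 'ghost', 'jack', 'vampire',
--                 'witch', 'mummy', 'zombie', 'werewolf', 'frankenstein']
--
--     counts = []
--     for turn in range(len(monsters)):
--         found = []
--         working_spell = spell
--         for monster in monsters:
--             while all(ct(working_spell)[char] >= ct(monster)[char] for char in ct(monster)):
--                 found.append(monster)
--                 for c in monster:
--                     working_spell = working_spell.replace(c, '', 1)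
--         counts.append(len(found))
--         monsters = monsters[1:] + monsters[:1]
--
--     return max(counts)
-- ===== SOURCE B (Python) =====
-- def halloween_monsters(spell: str) -> int:
--     monsters = ['skeleton', 'ghost', 'jack', 'vampire',
--                 'witch', 'mummy', 'zombie', 'werewolf', 'frankenstein']
--     n = len(monsters)
--     best = 0
--     for start in range(n):
--         avail = {}
--         for c in spell:
--             avail[c] = avail.get(c, 0) + 1
--         total = 0
--         for i in range(n):
--             m = monsters[(start + i) % n]
--             need = {}
--             for c in m:
--                 need[c] = need.get(c, 0) + 1
--             k = min(avail.get(c, 0) // cnt for c, cnt in need.items())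
--             for c, cnt in need.items():
--                 avail[c] = avail.get(c, 0) - k * cnt
--             total += k
--         best = max(best, total)
--     return best
-- ===== Notes on version B (the rewrite author's own statement) =====
-- stated objective: faster
-- what changed: A re-forms one monster copy per while-iteration, rebuilding Counter(working_spell) for every check and deleting letters one-by-one with str.replace; B builds one letter-count table and, per rotation and monster, takes all copies at once via k = min(avail//need) floor-division and a bulk subtraction on integer counts.
import Mathlib
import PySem

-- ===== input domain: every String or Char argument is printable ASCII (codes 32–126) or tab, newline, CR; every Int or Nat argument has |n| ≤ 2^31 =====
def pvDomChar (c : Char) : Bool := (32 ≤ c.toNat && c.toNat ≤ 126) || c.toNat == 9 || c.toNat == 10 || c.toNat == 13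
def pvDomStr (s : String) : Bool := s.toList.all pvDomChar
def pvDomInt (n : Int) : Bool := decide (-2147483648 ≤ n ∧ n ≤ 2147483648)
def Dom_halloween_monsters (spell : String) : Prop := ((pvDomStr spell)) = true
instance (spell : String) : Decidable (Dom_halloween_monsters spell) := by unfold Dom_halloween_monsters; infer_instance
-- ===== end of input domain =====

-- B replaces A's per-copy Counter-rebuild-and-replace while loops by one letter-count table and a
-- floor-division bulk subtraction per monster (objective: faster; same return value everywhere).

-- ===== PORT A =====
-- the fixed monster list (strings handled as lists of characters)
def pvMonstersA : List (List Char) :=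
  ["skeleton".toList, "ghost".toList, "jack".toList, "vampire".toList,
   "witch".toList, "mummy".toList, "zombie".toList, "werewolf".toList, "frankenstein".toList]

-- all(ct(working_spell)[char] >= ct(monster)[char] for char in ct(monster))
def pvCanForm (ws m : List Char) : Bool :=
  (PySem.Dict.counter m).keys.all
    (fun c => (PySem.Dict.counter m).getD c 0 ≤ (PySem.Dict.counter ws).getD c 0)

-- for c in monster: working_spell = working_spell.replace(c, '', 1)
-- (replace(c, '', 1) on a one-char pattern removes the first occurrence of c if present,
--  otherwise leaves the string unchanged: exactly List.erase)
def pvRemoveOnce (ws m : List Char) : List Char := m.foldl (fun w c => w.erase c) ws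

-- the while loop; fuel = len(working_spell) + 1 at the call site.  Each successful iteration
-- removes at least one character (every monster is nonempty and its letters are present),
-- so the fuel is never exhausted — proved in the lemmas below; it only makes the loop total.
def pvWhileA (m : List Char) : Nat → List (List Char) → List Char → List (List Char) × List Char
  | 0, found, ws => (found, ws)
  | fuel+1, found, ws =>
    if pvCanForm ws m then
      pvWhileA m fuel (found ++ [m]) (pvRemoveOnce ws m)
    else (found, ws)

-- one turn: found = []; working_spell = spell; for monster in monsters: while …
def pvTurnA (ws0 : List Char) (monsters : List (List Char)) : List (List Char) :=
  (monsters.foldl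
    (fun (st : List (List Char) × List Char) m => pvWhileA m (st.2.length + 1) st.1 st.2)
    ([], ws0)).1

def halloween_monsters (spell : String) : Int :=
  -- counts = []; for turn in range(len(monsters)): … ; monsters = monsters[1:] + monsters[:1]
  let res := (List.range pvMonstersA.length).foldl
    (fun (st : List Int × List (List Char)) _ =>
      (st.1 ++ [((pvTurnA spell.toList st.2).length : Int)],
       st.2.drop 1 ++ st.2.take 1))   -- monsters[1:] + monsters[:1]
    ([], pvMonstersA)
  -- max(counts): counts always has 9 elements, so max never sees an empty list
  (PySem.List.max? res.1 (fun x => x)).getD 0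

-- ===== PORT B =====
def pvMonstersB : List (List Char) :=
  ["skeleton".toList, "ghost".toList, "jack".toList, "vampire".toList,
   "witch".toList, "mummy".toList, "zombie".toList, "werewolf".toList, "frankenstein".toList]

-- avail = {}; for c in s: avail[c] = avail.get(c, 0) + 1
def pvCountTable (s : List Char) : PySem.Dict Char Int :=
  s.foldl (fun d c => d.insert c (d.getD c 0 + 1)) PySem.Dict.empty

-- one monster step on the count table: k = min(avail.get(c,0) // cnt …); subtract; total += k
def pvStepB (st : PySem.Dict Char Int × Int) (m : List Char) : PySem.Dict Char Int × Int :=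
  let need := pvCountTable m
  -- min(…): need is nonempty because every monster is a nonempty string
  let k := (PySem.List.min?
              (need.items.map (fun p => PySem.Int.floordiv (st.1.getD p.1 0) p.2))
              (fun x => x)).getD 0
  (need.items.foldl (fun d p => d.insert p.1 (d.getD p.1 0 - k * p.2)) st.1, st.2 + k)

def halloween_monsters_alt (spell : String) : Int :=
  let n := pvMonstersB.length
  (List.range n).foldl
    (fun best start =>
      let res := (List.range n).foldl
        (fun st i => pvStepB st (pvMonstersB.getD ((start + i) % n) []))  -- monsters[(start+i) % n]
        (pvCountTable spell.toList, 0)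
      max best res.2)
    0

-- ===== PRECONDITION & SPEC =====
def Spec_halloween_monsters (spell : String) (out : Int) : Prop := out = halloween_monsters_alt spell
instance (spell : String) (out : Int) : Decidable (Spec_halloween_monsters spell out) := by unfold Spec_halloween_monsters; infer_instance

-- ===== CLAIM (what is proved, stated in full; the proofs are below) =====
def Claim_equal_halloween_monsters : Prop := ∀ (spell : String), Dom_halloween_monsters spell → Spec_halloween_monsters spell (halloween_monsters spell)

-- ===== LEMMAS AND PROOFS =====


-- the per-monster multiplicity: min over the letters of m of count(ws,c) / count(m,c)
def kNat (ws m : List Char) : Nat :=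
  (PySem.List.min? (m.map (fun c => ws.count c / m.count c)) (fun x => x)).getD 0

theorem canForm_iff (ws m : List Char) :
    pvCanForm ws m = true ↔ ∀ c ∈ m, m.count c ≤ ws.count c := by
  simp only [pvCanForm, List.all_eq_true, PySem.Dict.keys_counter, PySem.Dict.getD_counter]
  constructor
  · intro h c hc
    have := h c ((PySem.Set.mem_ofList m c).2 hc)
    simpa using of_decide_eq_true this
  · intro h c hc
    have hc' := (PySem.Set.mem_ofList m c).1 hc
    exact decide_eq_true (by exact_mod_cast h c hc')

theorem removeOnce_spec : ∀ (m ws : List Char), (∀ c, m.count c ≤ ws.count c) →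
    (∀ c, (pvRemoveOnce ws m).count c = ws.count c - m.count c) ∧
    (pvRemoveOnce ws m).length = ws.length - m.length := by
  intro m
  induction m with
  | nil => intro ws _; simp [pvRemoveOnce]
  | cons a t ih =>
    intro ws h
    have ha : a ∈ ws := by
      have := h a; simp [List.count_cons_self] at this
      exact List.count_pos_iff.1 (by omega)
    have hrw : pvRemoveOnce ws (a :: t) = pvRemoveOnce (ws.erase a) t := rfl
    have hcnt : ∀ c, (ws.erase a).count c = ws.count c - if a == c then 1 else 0 := by
      intro c; exact List.count_erase
    have hstep : ∀ c, t.count c ≤ (ws.erase a).count c := by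
      intro c
      have := h c
      rw [hcnt c, List.count_cons] at *
      by_cases hca : c = a <;> simp [hca] at * <;> omega
    obtain ⟨ih1, ih2⟩ := ih (ws.erase a) hstep
    constructor
    · intro c
      rw [hrw, ih1 c, hcnt c, List.count_cons]
      have := h c
      rw [List.count_cons] at this
      by_cases hca : c = a <;> simp [hca] at * <;> omega
    · have hlen : 0 < ws.length := List.length_pos_of_mem ha
      have hel := List.length_erase_of_mem ha
      rw [hrw, ih2, hel]
      simp only [List.length_cons]
      omega

-- Nat fold-min toolbox
theorem le_foldl_min_iff (k : Nat) : ∀ (l : List Nat) (a : Nat),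
    k ≤ l.foldl min a ↔ k ≤ a ∧ ∀ x ∈ l, k ≤ x := by
  intro l
  induction l with
  | nil => simp
  | cons x t ih =>
    intro a
    simp only [List.foldl_cons, ih, List.mem_cons]
    constructor
    · rintro ⟨h1, h2⟩
      exact ⟨le_trans h1 (min_le_left _ _), fun y hy => by
        rcases hy with rfl | hy
        · exact le_trans h1 (min_le_right _ _)
        · exact h2 y hy⟩
    · rintro ⟨h1, h2⟩
      exact ⟨le_min h1 (h2 x (Or.inl rfl)), fun y hy => h2 y (Or.inr hy)⟩

theorem foldl_min_pred : ∀ (l : List Nat) (a : Nat),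
    (l.map (fun x => x - 1)).foldl min (a - 1) = l.foldl min a - 1 := by
  intro l
  induction l with
  | nil => intro a; rfl
  | cons x t ih =>
    intro a
    simp only [List.map_cons, List.foldl_cons]
    rw [show min (a - 1) (x - 1) = min a x - 1 by omega]
    exact ih _

theorem foldl_min_cast : ∀ (l : List Nat) (a : Nat),
    (l.map (Nat.cast : Nat → Int)).foldl min ((a : Int)) = ((l.foldl min a : Nat) : Int) := by
  intro l
  induction l with
  | nil => intro a; rfl
  | cons x t ih =>
    intro a
    simp only [List.map_cons, List.foldl_cons]
    rw [show min ((a : Int)) ((x : Int)) = ((min a x : Nat) : Int) by simp [Nat.cast_min], ih]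

theorem kNat_one_le_iff (ws m : List Char) (hm : m ≠ []) :
    1 ≤ kNat ws m ↔ ∀ c ∈ m, m.count c ≤ ws.count c := by
  obtain ⟨a, t, rfl⟩ := List.exists_cons_of_ne_nil hm
  unfold kNat
  rw [List.map_cons, PySem.List.min?_id_cons, Option.getD_some, le_foldl_min_iff]
  constructor
  · rintro ⟨h1, h2⟩ c hc
    rcases List.mem_cons.1 hc with rfl | hc
    · exact (Nat.one_le_div_iff (List.count_pos_iff.2 (List.mem_cons_self))).1 h1
    · have := h2 _ (List.mem_map_of_mem (f := fun c => ws.count c / (a :: t).count c) hc)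
      exact (Nat.one_le_div_iff (List.count_pos_iff.2 (List.mem_cons.2 (Or.inr hc)))).1 this
  · intro h
    refine ⟨(Nat.one_le_div_iff (List.count_pos_iff.2 List.mem_cons_self)).2
        (h a List.mem_cons_self), ?_⟩
    intro x hx
    obtain ⟨c, hc, rfl⟩ := List.mem_map.1 hx
    exact (Nat.one_le_div_iff (List.count_pos_iff.2 (List.mem_cons.2 (Or.inr hc)))).2
      (h c (List.mem_cons.2 (Or.inr hc)))

theorem kNat_eq_zero (ws m : List Char) (hm : m ≠ [])
    (h : ¬ ∀ c ∈ m, m.count c ≤ ws.count c) : kNat ws m = 0 := by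
  by_contra h0
  exact h ((kNat_one_le_iff ws m hm).1 (by omega))

theorem kNat_pred (ws ws' m : List Char) (hm : m ≠ [])
    (hall : ∀ c ∈ m, m.count c ≤ ws.count c)
    (hws' : ∀ c, ws'.count c = ws.count c - m.count c) :
    kNat ws' m = kNat ws m - 1 := by
  obtain ⟨a, t, rfl⟩ := List.exists_cons_of_ne_nil hm
  unfold kNat
  rw [List.map_cons, List.map_cons, PySem.List.min?_id_cons, PySem.List.min?_id_cons,
      Option.getD_some, Option.getD_some]
  have hdiv : ∀ c ∈ (a :: t), ws'.count c / (a :: t).count c = ws.count c / (a :: t).count c - 1 := by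
    intro c hc
    have hpos : 0 < (a :: t).count c := List.count_pos_iff.2 hc
    have hle : (a :: t).count c ≤ ws.count c := hall c hc
    rw [hws' c]
    conv_rhs => rw [Nat.div_eq_sub_div hpos hle]
    exact (Nat.add_sub_cancel _ _).symm
  have hmap : t.map (fun c => ws'.count c / (a :: t).count c)
      = (t.map (fun c => ws.count c / (a :: t).count c)).map (fun x => x - 1) := by
    rw [List.map_map]
    exact List.map_congr_left (fun c hc => hdiv c (List.mem_cons.2 (Or.inr hc)))
  rw [hmap, hdiv a List.mem_cons_self, foldl_min_pred]

theorem kNat_le_length (ws m : List Char) (hm : m ≠ []) : kNat ws m ≤ ws.length := by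
  obtain ⟨a, t, rfl⟩ := List.exists_cons_of_ne_nil hm
  unfold kNat
  rw [List.map_cons, PySem.List.min?_id_cons, Option.getD_some]
  have h1 : (t.map (fun c => ws.count c / (a :: t).count c)).foldl min
      (ws.count a / (a :: t).count a) ≤ ws.count a / (a :: t).count a := by
    have := le_foldl_min_iff ((t.map (fun c => ws.count c / (a :: t).count c)).foldl min
      (ws.count a / (a :: t).count a)) (t.map (fun c => ws.count c / (a :: t).count c))
      (ws.count a / (a :: t).count a)
    exact (this.1 le_rfl).1
  calc _ ≤ ws.count a / (a :: t).count a := h1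
    _ ≤ ws.count a := Nat.div_le_self _ _
    _ ≤ ws.length := List.count_le_length

theorem kNat_mul_le (ws m : List Char) (c : Char) : kNat ws m * m.count c ≤ ws.count c := by
  by_cases hc : c ∈ m
  · obtain ⟨a, t, rfl⟩ := List.exists_cons_of_ne_nil (List.ne_nil_of_mem hc)
    have hk : kNat ws (a :: t) ≤ ws.count c / (a :: t).count c := by
      unfold kNat
      rw [List.map_cons, PySem.List.min?_id_cons, Option.getD_some]
      rcases List.mem_cons.1 hc with rfl | hc'
      · exact ((le_foldl_min_iff _ _ _).1 le_rfl).1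
      · exact ((le_foldl_min_iff _ _ _).1 le_rfl).2 _
          (List.mem_map_of_mem (f := fun c => ws.count c / (a :: t).count c) hc')
    calc kNat ws (a :: t) * (a :: t).count c
        ≤ (ws.count c / (a :: t).count c) * (a :: t).count c :=
          Nat.mul_le_mul_right _ hk
      _ ≤ ws.count c := Nat.div_mul_le_self _ _
  · simp [List.count_eq_zero_of_not_mem hc]

theorem while_spec (m : List Char) (hm : m ≠ []) : ∀ (fuel : Nat) (found : List (List Char))
    (ws : List Char), kNat ws m < fuel →
    (pvWhileA m fuel found ws).1.length = found.length + kNat ws m ∧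
    ∀ c, (pvWhileA m fuel found ws).2.count c = ws.count c - kNat ws m * m.count c := by
  intro fuel
  induction fuel with
  | zero => intro found ws h; omega
  | succ fuel ih =>
    intro found ws hfuel
    by_cases hcf : pvCanForm ws m = true
    · have hall := (canForm_iff ws m).1 hcf
      have hall' : ∀ c, m.count c ≤ ws.count c := by
        intro c
        by_cases hc : c ∈ m
        · exact hall c hc
        · simp [List.count_eq_zero_of_not_mem hc]
      obtain ⟨hcnt, _⟩ := removeOnce_spec m ws hall'
      have hk1 : 1 ≤ kNat ws m := (kNat_one_le_iff ws m hm).2 hall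
      have hkp : kNat (pvRemoveOnce ws m) m = kNat ws m - 1 := kNat_pred ws _ m hm hall hcnt
      have hrec : pvWhileA m (fuel + 1) found ws
          = pvWhileA m fuel (found ++ [m]) (pvRemoveOnce ws m) := by
        simp [pvWhileA, hcf]
      obtain ⟨ih1, ih2⟩ := ih (found ++ [m]) (pvRemoveOnce ws m) (by omega)
      rw [hrec]
      constructor
      · rw [ih1]; simp; omega
      · intro c
        rw [ih2 c, hcnt c, hkp]
        have hb := hall' c
        have : (kNat ws m - 1) * m.count c + m.count c = kNat ws m * m.count c := by
          have := Nat.succ_pred_eq_of_pos hk1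
          calc (kNat ws m - 1) * m.count c + m.count c = (kNat ws m - 1 + 1) * m.count c := by ring
            _ = kNat ws m * m.count c := by rw [Nat.sub_add_cancel hk1]
        omega
    · have h0 : kNat ws m = 0 :=
        kNat_eq_zero ws m hm (fun hc => hcf ((canForm_iff ws m).2 hc))
      have : pvWhileA m (fuel + 1) found ws = (found, ws) := by
        simp [pvWhileA, hcf]
      rw [this, h0]
      simp

-- B-side: the bulk-subtraction fold on the count table
theorem foldSub_gen (k : Int) (val : Char → Int) : ∀ (l : List Char), l.Nodup →
    ∀ (d : PySem.Dict Char Int) (c : Char),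
    ((l.map (fun x => (x, val x))).foldl
        (fun d p => d.insert p.1 (d.getD p.1 0 - k * p.2)) d).getD c 0
      = if c ∈ l then d.getD c 0 - k * val c else d.getD c 0 := by
  intro l
  induction l with
  | nil => intro _ d c; simp
  | cons x t ih =>
    intro hnd d c
    rw [List.map_cons, List.foldl_cons]
    obtain ⟨hx, ht⟩ := List.nodup_cons.1 hnd
    rw [ih ht]
    by_cases hcx : c = x
    · subst hcx
      simp [hx]
    · by_cases hct : c ∈ t <;> simp [hcx, hct, PySem.Dict.getD_insert]

theorem min_cast_getD (l : List Nat) (hl : l ≠ []) :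
    (PySem.List.min? (l.map (Nat.cast : Nat → Int)) (fun x => x)).getD 0
      = (((PySem.List.min? l (fun x => x)).getD 0 : Nat) : Int) := by
  obtain ⟨a, t, rfl⟩ := List.exists_cons_of_ne_nil hl
  rw [List.map_cons, PySem.List.min?_id_cons, PySem.List.min?_id_cons,
      Option.getD_some, Option.getD_some, foldl_min_cast]

theorem min_dedup_getD (f : Char → Nat) (m : List Char) (hm : m ≠ []) :
    (PySem.List.min? ((PySem.Set.ofList m).map f) (fun x => x)).getD 0
      = (PySem.List.min? (m.map f) (fun x => x)).getD 0 := by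
  obtain ⟨a, t, rfl⟩ := List.exists_cons_of_ne_nil hm
  have h1 : (PySem.Set.ofList (a :: t)).map f ≠ [] := by
    have : a ∈ PySem.Set.ofList (a :: t) := (PySem.Set.mem_ofList _ _).2 List.mem_cons_self
    intro hc
    simp only [List.map_eq_nil_iff] at hc
    rw [hc] at this
    exact (List.not_mem_nil) this
  have h2 : (a :: t).map f ≠ [] := by simp
  obtain ⟨v1, hv1⟩ := Option.ne_none_iff_exists'.1
    (fun hc => h1 ((PySem.List.min?_eq_none_iff
      ((PySem.Set.ofList (a :: t)).map f) (fun x => x)).1 hc))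
  obtain ⟨v2, hv2⟩ := Option.ne_none_iff_exists'.1
    (fun hc => h2 ((PySem.List.min?_eq_none_iff ((a :: t).map f) (fun x => x)).1 hc))
  rw [hv1, hv2, Option.getD_some, Option.getD_some]
  have m1 := PySem.List.min?_mem hv1
  have m2 := PySem.List.min?_mem hv2
  obtain ⟨c1, hc1, rfl⟩ := List.mem_map.1 m1
  obtain ⟨c2, hc2, rfl⟩ := List.mem_map.1 m2
  apply le_antisymm
  · exact PySem.List.min?_isMin hv1 _
      (List.mem_map_of_mem ((PySem.Set.mem_ofList _ _).2 hc2))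
  · exact PySem.List.min?_isMin hv2 _
      (List.mem_map_of_mem ((PySem.Set.mem_ofList _ _).1 hc1))

theorem stepB_spec (ws m : List Char) (hm : m ≠ []) (d : PySem.Dict Char Int) (total : Int)
    (hInv : ∀ c, d.getD c 0 = (ws.count c : Int)) :
    (pvStepB (d, total) m).2 = total + (kNat ws m : Int) ∧
    ∀ c, (pvStepB (d, total) m).1.getD c 0
      = ((ws.count c - kNat ws m * m.count c : Nat) : Int) := by
  have hneed : pvCountTable m = PySem.Dict.counter m :=
    PySem.Dict.foldl_insert_getD_add_one_eq_counter m
  have hitems : (pvCountTable m).items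
      = (PySem.Set.ofList m).map (fun c => (c, (m.count c : Int))) := by
    rw [hneed]; exact PySem.Dict.items_counter m
  have hklist : (pvCountTable m).items.map (fun p => PySem.Int.floordiv (d.getD p.1 0) p.2)
      = ((PySem.Set.ofList m).map (fun c => ws.count c / m.count c)).map (Nat.cast : Nat → Int) := by
    rw [hitems, List.map_map, List.map_map]
    apply List.map_congr_left
    intro c _
    simp only [Function.comp]
    rw [hInv c]
    exact PySem.Int.floordiv_natCast _ _
  have hofl : PySem.Set.ofList m ≠ [] := by
    obtain ⟨a, t, rfl⟩ := List.exists_cons_of_ne_nil hm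
    have : a ∈ PySem.Set.ofList (a :: t) := (PySem.Set.mem_ofList _ _).2 List.mem_cons_self
    intro hc; rw [hc] at this; exact (List.not_mem_nil) this
  have hk : (PySem.List.min? ((pvCountTable m).items.map
        (fun p => PySem.Int.floordiv (d.getD p.1 0) p.2)) (fun x => x)).getD 0
      = (kNat ws m : Int) := by
    rw [hklist, min_cast_getD _ (by simpa using hofl)]
    rw [min_dedup_getD _ m hm]
    rfl
  constructor
  · simp only [pvStepB]
    rw [hk]
  · intro c
    simp only [pvStepB]
    rw [hk, hitems, foldSub_gen _ _ _ (PySem.Set.nodup_ofList m)]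
    have hmul := kNat_mul_le ws m c
    by_cases hc : c ∈ m
    · rw [if_pos ((PySem.Set.mem_ofList _ _).2 hc), hInv c]
      push_cast [Nat.cast_sub hmul]
      ring
    · rw [if_neg (fun h => hc ((PySem.Set.mem_ofList _ _).1 h)), hInv c,
          List.count_eq_zero_of_not_mem hc]
      simp

theorem turn_eq : ∀ (ms : List (List Char)), (∀ m ∈ ms, m ≠ []) →
    ∀ (found : List (List Char)) (ws : List Char) (d : PySem.Dict Char Int) (total : Int),
    (∀ c, d.getD c 0 = (ws.count c : Int)) → total = (found.length : Int) →
    (((ms.foldl (fun (st : List (List Char) × List Char) m =>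
        pvWhileA m (st.2.length + 1) st.1 st.2) (found, ws)).1.length : Int))
      = (ms.foldl pvStepB (d, total)).2 := by
  intro ms
  induction ms with
  | nil => intro _ found ws d total hInv htot; simpa using htot.symm
  | cons m t ih =>
    intro h found ws d total hInv htot
    have hm : m ≠ [] := h m List.mem_cons_self
    have hfuel : kNat ws m < ws.length + 1 := Nat.lt_succ_of_le (kNat_le_length ws m hm)
    obtain ⟨hw1, hw2⟩ := while_spec m hm (ws.length + 1) found ws hfuel
    obtain ⟨hs2, hs1⟩ := stepB_spec ws m hm d total hInv
    rw [List.foldl_cons, List.foldl_cons]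
    have := ih (fun x hx => h x (List.mem_cons.2 (Or.inr hx)))
      (pvWhileA m (ws.length + 1) found ws).1 (pvWhileA m (ws.length + 1) found ws).2
      (pvStepB (d, total) m).1 (pvStepB (d, total) m).2
      (fun c => by rw [hs1 c, hw2 c]) (by rw [hs2, hw1, htot]; push_cast; ring)
    simpa using this

-- top-level glue: the t-th rotation of the monster list, and both programs' per-turn totals
def rotA (t : Nat) : List (List Char) := pvMonstersA.drop t ++ pvMonstersA.take t

def aVal (spell : String) (t : Nat) : Int := ((pvTurnA spell.toList (rotA t)).length : Int)

def bVal (spell : String) (t : Nat) : Int :=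
  ((rotA t).foldl pvStepB (pvCountTable spell.toList, 0)).2

def wVal (spell : String) (s : Nat) : Int :=
  ((List.range pvMonstersB.length).foldl
    (fun st i => pvStepB st (pvMonstersB.getD ((s + i) % pvMonstersB.length) []))
    (pvCountTable spell.toList, 0)).2

theorem rot_nonnil (t : Nat) : ∀ m ∈ rotA t, m ≠ [] := by
  intro m hm
  have hmem : m ∈ pvMonstersA := by
    rcases List.mem_append.1 hm with h | h
    · exact List.mem_of_mem_drop h
    · exact List.mem_of_mem_take h
  simp only [pvMonstersA, List.mem_cons, List.not_mem_nil, or_false] at hmem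
  rcases hmem with rfl | rfl | rfl | rfl | rfl | rfl | rfl | rfl | rfl <;> decide

theorem aVal_eq_bVal (spell : String) (t : Nat) : aVal spell t = bVal spell t := by
  unfold aVal bVal pvTurnA
  exact turn_eq (rotA t) (rot_nonnil t) [] spell.toList (pvCountTable spell.toList) 0
    (fun c => by
      rw [show pvCountTable spell.toList = PySem.Dict.counter spell.toList from
        PySem.Dict.foldl_insert_getD_add_one_eq_counter _]
      exact PySem.Dict.getD_counter _ _) (by simp)

theorem wVal_eq_bVal (spell : String) : ∀ s, s < 9 → wVal spell s = bVal spell s := by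
  intro s hs
  unfold wVal bVal
  rw [← List.foldl_map]
  have hlist : ∀ s' : Nat, s' < 9 →
      (List.range pvMonstersB.length).map
        (fun i => pvMonstersB.getD ((s' + i) % pvMonstersB.length) []) = rotA s' := by
    decide
  rw [hlist s hs]

theorem hA_shape (spell : String) : halloween_monsters spell
    = (PySem.List.max? [aVal spell 0, aVal spell 1, aVal spell 2, aVal spell 3, aVal spell 4,
        aVal spell 5, aVal spell 6, aVal spell 7, aVal spell 8] (fun x => x)).getD 0 := rfl

theorem hB_shape (spell : String) : halloween_monsters_alt spell
    = [wVal spell 0, wVal spell 1, wVal spell 2, wVal spell 3, wVal spell 4,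
       wVal spell 5, wVal spell 6, wVal spell 7, wVal spell 8].foldl max 0 := rfl

-- ===== VERDICT (by name: the statement is the Claim_ definition above) =====
theorem halloween_monsters_spec : Claim_equal_halloween_monsters := by
  unfold Claim_equal_halloween_monsters
  intro spell _
  unfold Spec_halloween_monsters
  have he : ∀ s, s < 9 → aVal spell s = wVal spell s := fun s hs =>
    (aVal_eq_bVal spell s).trans (wVal_eq_bVal spell s hs).symm
  rw [hA_shape, hB_shape, PySem.List.max?_id_cons, Option.getD_some,
      he 0 (by norm_num), he 1 (by norm_num), he 2 (by norm_num), he 3 (by norm_num),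
      he 4 (by norm_num), he 5 (by norm_num), he 6 (by norm_num), he 7 (by norm_num),
      he 8 (by norm_num)]
  have h0 : (0 : Int) ≤ wVal spell 0 := by
    rw [← he 0 (by norm_num)]
    exact Int.natCast_nonneg _
  simp only [List.foldl_cons, List.foldl_nil]
  rw [max_eq_right h0]
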